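-- pv_equiv track=rewrite | github.com/delcanovega/AoC24 | Day_14/part_2.py | has_suspicious_group
-- ===== SOURCE A (Python) =====
-- from collections import deque
--
-- def has_suspicious_group(positions):
--     points_set = set(positions)
--     groups = []
--
--     directions = [(0, 1), (0, -1), (1, 0), (-1, 0)]
--
--     def bfs(pos):
--         queue = deque([pos])
--         cluster = []
--
--         while queue:
--             x, y = queue.popleft()
--             if (x, y) in points_set:
--                 points_set.remove((x, y))
--                 cluster.append((x, y))
--
--                 for dx, dy in directions:
--                     neighbor = (x + dx, y + dy)
--                     if neighbor in points_set:
--                         queue.append(neighbor)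
--
--         return cluster
--
--     while points_set:
--         initial_pos = next(iter(points_set))
--         group = bfs(initial_pos)
--         groups.append(group)
--
--     threshold = 50
--     return any([len(group) > threshold for group in groups])
-- ===== SOURCE B (Python) =====
-- def has_suspicious_group(positions):
--     # Incremental component merging: one pass over the points, maintaining the
--     # disjoint connected components of the points seen so far.
--     comps = []   # list of disjoint sets, the components of `seen`
--     seen = set()
--     for p in positions:
--         if p in seen:
--             continue
--         seen.add(p)
--         x, y = p
--         nbrs = ((x, y + 1), (x, y - 1), (x + 1, y), (x - 1, y))
--         merged = {p}
--         rest = []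
--         for c in comps:
--             if any(n in c for n in nbrs):
--                 merged |= c
--             else:
--                 rest.append(c)
--         comps = rest + [merged]
--     return any(len(c) > 50 for c in comps)
-- ===== Notes on version B (the rewrite author's own statement) =====
-- stated objective: alternative
-- what changed: Replaces repeated BFS flood-fill extraction from a shrinking set with a single incremental pass that maintains the disjoint connected components seen so far, merging the components adjacent to each new point.
import Mathlib
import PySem

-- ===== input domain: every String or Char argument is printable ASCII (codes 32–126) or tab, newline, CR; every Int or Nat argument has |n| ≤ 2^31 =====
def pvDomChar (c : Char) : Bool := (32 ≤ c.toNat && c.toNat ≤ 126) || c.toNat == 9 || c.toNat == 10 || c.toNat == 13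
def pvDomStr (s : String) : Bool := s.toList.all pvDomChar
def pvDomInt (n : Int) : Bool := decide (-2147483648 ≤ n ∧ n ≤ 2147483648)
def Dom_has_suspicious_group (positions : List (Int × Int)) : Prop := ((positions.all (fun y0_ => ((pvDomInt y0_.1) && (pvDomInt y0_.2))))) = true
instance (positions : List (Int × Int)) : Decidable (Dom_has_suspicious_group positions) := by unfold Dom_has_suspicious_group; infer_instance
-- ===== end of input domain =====

-- B replaces A's repeated BFS flood-fill extraction by a single incremental pass that
-- maintains the disjoint connected components of the points seen so far (objective: alternative).

-- ===== PORT A =====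
def pvDirections : List (Int × Int) := [(0, 1), (0, -1), (1, 0), (-1, 0)]

theorem pvBfs_dec1 (S : PySem.Set (Int × Int)) (pos : Int × Int)
    (qs : List (Int × Int)) (h : PySem.Set.contains S pos = true) :
    5 * (S.erase pos).length +
      (qs ++ (pvDirections.map (fun d => (pos.1 + d.1, pos.2 + d.2))).filter
        (fun n => PySem.Set.contains (S.erase pos) n)).length <
      5 * S.length + (pos :: qs).length := by
  have hm : pos ∈ S := (PySem.Set.contains_iff S pos).mp h
  have h1 : (S.erase pos).length = S.length - 1 := List.length_erase_of_mem hm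
  have h2 : 0 < S.length := List.length_pos_of_mem hm
  have h3 : ((pvDirections.map (fun d => (pos.1 + d.1, pos.2 + d.2))).filter
      (fun n => PySem.Set.contains (S.erase pos) n)).length ≤ 4 := by
    calc _ ≤ (pvDirections.map (fun d => (pos.1 + d.1, pos.2 + d.2))).length :=
          List.length_filter_le _ _
      _ = 4 := by simp [pvDirections]
  simp only [List.length_append, List.length_cons, h1]
  omega

theorem pvBfs_dec2 (S : PySem.Set (Int × Int)) (pos : Int × Int) (qs : List (Int × Int)) :
    5 * S.length + qs.length < 5 * S.length + (pos :: qs).length := by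
  simp only [List.length_cons]; omega

-- the inner `bfs` closure of A; it mutates the shared points_set, so it returns (cluster, points_set)
def pvBfs (S : PySem.Set (Int × Int)) (queue : List (Int × Int)) (cluster : List (Int × Int)) :
    List (Int × Int) × PySem.Set (Int × Int) :=
  match queue with
  | [] => (cluster, S)
  | pos :: qs =>
    if h : PySem.Set.contains S pos = true then
      -- Python's set.remove on a checked member: erase it from the distinct-element list (exact)
      let S' := S.erase pos
      let nbrs := (pvDirections.map (fun d => (pos.1 + d.1, pos.2 + d.2))).filter
          (fun n => PySem.Set.contains S' n)
      pvBfs S' (qs ++ nbrs) (cluster ++ [pos])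
    else pvBfs S qs cluster
termination_by 5 * S.length + queue.length
decreasing_by
  · exact pvBfs_dec1 S pos qs h
  · exact pvBfs_dec2 S pos qs

-- the outer `while points_set:` loop of A; fuel = |points_set| is a pure totality
-- guard (each iteration strictly shrinks the set, so the fuel never runs out)
def pvLoop (fuel : Nat) (S : PySem.Set (Int × Int)) (groups : List (List (Int × Int))) :
    List (List (Int × Int)) :=
  match fuel with
  | 0 => groups
  | fuel + 1 =>
    match S with
    | [] => groups
    | p :: rest =>
      let r := pvBfs (p :: rest) [p] []
      pvLoop fuel r.2 (groups ++ [r.1])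

def has_suspicious_group (positions : List (Int × Int)) : Bool :=
  let pointsSet := PySem.Set.ofList positions
  let groups := pvLoop pointsSet.length pointsSet []
  ((groups.map (fun g => decide (50 < g.length))).any id)

-- ===== PORT B =====
def pvNbrs (p : Int × Int) : List (Int × Int) :=
  [(p.1, p.2 + 1), (p.1, p.2 - 1), (p.1 + 1, p.2), (p.1 - 1, p.2)]

-- the inner `for c in comps:` loop of B, producing comps' = rest ++ [merged]
def pvAddPoint (comps : List (PySem.Set (Int × Int))) (p : Int × Int) :
    List (PySem.Set (Int × Int)) :=
  let mr := comps.foldl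
    (fun (mr : PySem.Set (Int × Int) × List (PySem.Set (Int × Int))) c =>
      if (pvNbrs p).any (fun n => PySem.Set.contains c n) then (PySem.Set.union mr.1 c, mr.2)
      else (mr.1, mr.2 ++ [c]))
    (PySem.Set.ofList [p], [])
  mr.2 ++ [mr.1]

def has_suspicious_group_alt (positions : List (Int × Int)) : Bool :=
  let st := positions.foldl
    (fun (st : List (PySem.Set (Int × Int)) × PySem.Set (Int × Int)) p =>
      if PySem.Set.contains st.2 p then st
      else (pvAddPoint st.1 p, PySem.Set.add st.2 p))
    ([], PySem.Set.empty)
  st.1.any (fun c => decide (50 < c.length))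

-- ===== PRECONDITION & SPEC =====
def Spec_has_suspicious_group (positions : List (Int × Int)) (out : Bool) : Prop := out = has_suspicious_group_alt positions
instance (positions : List (Int × Int)) (out : Bool) : Decidable (Spec_has_suspicious_group positions out) := by unfold Spec_has_suspicious_group; infer_instance

-- ===== CLAIM (what is proved, stated in full; the proofs are below) =====
def Claim_equal_has_suspicious_group : Prop := ∀ (positions : List (Int × Int)), Dom_has_suspicious_group positions → Spec_has_suspicious_group positions (has_suspicious_group positions)

-- ===== LEMMAS AND PROOFS =====

theorem pvBfs_snd_len_le (S : PySem.Set (Int × Int)) (queue cluster : List (Int × Int)) :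
    (pvBfs S queue cluster).2.length ≤ S.length := by
  fun_induction pvBfs S queue cluster with
  | case1 => simp
  | case2 S cluster pos qs h S' nbrs ih =>
      exact le_trans ih List.length_erase_le
  | case3 S cluster pos qs h ih => exact ih

theorem pvBfs_snd_len_lt (S : PySem.Set (Int × Int)) (pos : Int × Int)
    (qs cluster : List (Int × Int)) (hm : pos ∈ S) :
    (pvBfs S (pos :: qs) cluster).2.length < S.length := by
  have h : PySem.Set.contains S pos = true := (PySem.Set.contains_iff S pos).mpr hm
  rw [pvBfs]
  simp only [h, dite_true]
  have h1 : (S.erase pos).length = S.length - 1 := List.length_erase_of_mem hm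
  have h2 : 0 < S.length := List.length_pos_of_mem hm
  exact lt_of_le_of_lt (pvBfs_snd_len_le _ _ _) (by omega)


-- grid adjacency and reachability inside a set of points
def pvAdj (a b : Int × Int) : Prop := b ∈ pvNbrs a

def pvReach (T : Set (Int × Int)) (a b : Int × Int) : Prop :=
  Relation.ReflTransGen (fun u v => v ∈ T ∧ pvAdj u v) a b

def pvComp (T : Set (Int × Int)) (p : Int × Int) : Set (Int × Int) :=
  {q | q ∈ T ∧ pvReach T p q}

-- "some connected component has more than 50 points"
def pvBig (T : Set (Int × Int)) : Prop := ∃ p ∈ T, 50 < (pvComp T p).ncard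

theorem pvAdj_symm {a b : Int × Int} (h : pvAdj a b) : pvAdj b a := by
  simp only [pvAdj, pvNbrs, List.mem_cons, Prod.ext_iff,
    List.not_mem_nil, or_false] at h ⊢
  omega

theorem pvReach_mem {T : Set (Int × Int)} {p q : Int × Int} (hp : p ∈ T)
    (h : pvReach T p q) : q ∈ T := by
  induction h with
  | refl => exact hp
  | tail _ step _ => exact step.1

theorem pvReach_mono {S T : Set (Int × Int)} (hST : S ⊆ T) {p q : Int × Int}
    (h : pvReach S p q) : pvReach T p q :=
  Relation.ReflTransGen.mono (fun _ _ hr => ⟨hST hr.1, hr.2⟩) h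

theorem pvReach_symm {T : Set (Int × Int)} {p q : Int × Int} (hp : p ∈ T)
    (h : pvReach T p q) : pvReach T q p := by
  induction h with
  | refl => exact Relation.ReflTransGen.refl
  | tail hb step ih =>
      exact Relation.ReflTransGen.head ⟨pvReach_mem hp hb, pvAdj_symm step.2⟩ ih

theorem pvComp_self {T : Set (Int × Int)} {p : Int × Int} (hp : p ∈ T) : p ∈ pvComp T p :=
  ⟨hp, Relation.ReflTransGen.refl⟩

theorem pvComp_closed {T : Set (Int × Int)} {p q r : Int × Int}
    (hq : q ∈ pvComp T p) (hr : r ∈ T) (ha : pvAdj q r) : r ∈ pvComp T p :=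
  ⟨hr, hq.2.tail ⟨hr, ha⟩⟩

theorem pvComp_eq {T : Set (Int × Int)} {p q : Int × Int} (hp : p ∈ T)
    (hq : q ∈ pvComp T p) : pvComp T q = pvComp T p := by
  ext z
  constructor
  · rintro ⟨hz, hre⟩; exact ⟨hz, hq.2.trans hre⟩
  · rintro ⟨hz, hre⟩; exact ⟨hz, (pvReach_symm hp hq.2).trans hre⟩

theorem pvComp_sdiff {T : Set (Int × Int)} {p₁ q : Int × Int} (hp1 : p₁ ∈ T)
    (hq : q ∈ T) (hqn : q ∉ pvComp T p₁) :
    pvComp (T \ pvComp T p₁) q = pvComp T q := by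
  have hdisj : ∀ z, z ∈ pvComp T q → z ∉ pvComp T p₁ := by
    rintro z ⟨hzT, hre⟩ ⟨_, hre1⟩
    exact hqn ⟨hq, hre1.trans (pvReach_symm hq hre)⟩
  ext z
  constructor
  · rintro ⟨⟨hz, _⟩, hre⟩
    exact ⟨hz, pvReach_mono (Set.diff_subset) hre⟩
  · rintro ⟨hz, hre⟩
    refine ⟨⟨hz, hdisj z ⟨hz, hre⟩⟩, ?_⟩
    clear hz
    induction hre with
    | refl => exact Relation.ReflTransGen.refl
    | tail hb step ih =>
        exact ih.tail ⟨⟨step.1, hdisj _ ⟨step.1, hb.tail step⟩⟩, step.2⟩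

theorem pvComp_insert_self {T : Set (Int × Int)} {p : Int × Int} (hp : p ∉ T) :
    ∀ z, z ∈ pvComp (insert p T) p ↔
      (z = p ∨ ∃ m, m ∈ T ∧ pvAdj p m ∧ z ∈ pvComp T m) := by
  intro z
  constructor
  · rintro ⟨hzT, hre⟩
    clear hzT
    induction hre with
    | refl => exact Or.inl rfl
    | tail hb step ih =>
        rcases step with ⟨hcT, hadj⟩
        rcases Set.mem_insert_iff.mp hcT with hc | hc
        · exact Or.inl hc
        · rcases ih with rfl | ⟨m, hmT, hadjm, hbm⟩
          · exact Or.inr ⟨_, hc, hadj, pvComp_self hc⟩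
          · exact Or.inr ⟨m, hmT, hadjm, pvComp_closed hbm hc hadj⟩
  · rintro (rfl | ⟨m, hmT, hadj, hzc⟩)
    · exact pvComp_self (Set.mem_insert _ _)
    · refine ⟨Set.mem_insert_iff.mpr (Or.inr hzc.1), ?_⟩
      exact Relation.ReflTransGen.head ⟨Set.mem_insert_iff.mpr (Or.inr hmT), hadj⟩
        (pvReach_mono (Set.subset_insert p T) hzc.2)

theorem pvComp_insert_other {T : Set (Int × Int)} {p x : Int × Int} (hp : p ∉ T)
    (hx : x ∈ T) (hnc : ∀ m ∈ pvComp T x, ¬ pvAdj p m) :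
    pvComp (insert p T) x = pvComp T x := by
  have key : ∀ z, pvReach (insert p T) x z → z ∈ pvComp T x := by
    intro z h
    induction h with
    | refl => exact pvComp_self hx
    | tail hb step ih =>
        rcases step with ⟨hcT, hadj⟩
        rcases Set.mem_insert_iff.mp hcT with hc | hc
        · exact absurd (pvAdj_symm (hc ▸ hadj)) (hnc _ ih)
        · exact pvComp_closed ih hc hadj
  ext z
  constructor
  · rintro ⟨_, hre⟩; exact key z hre
  · rintro ⟨hz, hre⟩
    exact ⟨Set.mem_insert_iff.mpr (Or.inr hz), pvReach_mono (Set.subset_insert p T) hre⟩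

theorem pvLen_eq_ncard {l : List (Int × Int)} {T : Set (Int × Int)} (hn : l.Nodup)
    (h : ∀ z, z ∈ l ↔ z ∈ T) : l.length = T.ncard := by
  have hT : T = ↑l.toFinset := by
    ext z; simp [← h]
  rw [hT, Set.ncard_coe_finset, List.toFinset_card_of_nodup hn]

theorem pvBig_split {T : Set (Int × Int)} {p : Int × Int} (hp : p ∈ T) :
    pvBig T ↔ 50 < (pvComp T p).ncard ∨ pvBig (T \ pvComp T p) := by
  constructor
  · rintro ⟨r, hr, hlen⟩
    by_cases hrc : r ∈ pvComp T p
    · left; rwa [pvComp_eq hp hrc] at hlen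
    · right; exact ⟨r, ⟨hr, hrc⟩, by rwa [pvComp_sdiff hp hr hrc]⟩
  · rintro (h | ⟨r, ⟨hr, hrc⟩, hlen⟩)
    · exact ⟨p, hp, h⟩
    · exact ⟨r, hr, by rwa [pvComp_sdiff hp hr hrc] at hlen⟩

theorem pvDirs_map (x : Int × Int) :
    pvDirections.map (fun d => (x.1 + d.1, x.2 + d.2)) = pvNbrs x := by
  simp [pvDirections, pvNbrs]
  constructor <;> omega

-- BFS invariant: bfs extracts exactly the connected component of p and removes it
theorem pvBfs_inv (T : Set (Int × Int)) (p : Int × Int)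
    (S : PySem.Set (Int × Int)) (q c : List (Int × Int)) :
    S.Nodup → c.Nodup →
    (∀ z, z ∈ S ↔ z ∈ T ∧ z ∉ c) →
    (∀ z ∈ c, z ∈ pvComp T p) →
    (∀ z ∈ q, z ∈ pvComp T p) →
    (∀ a ∈ c, ∀ b, pvAdj a b → b ∈ S → b ∈ q) →
    (p ∈ c ∨ p ∈ q) →
    ((pvBfs S q c).1.Nodup ∧ (∀ z, z ∈ (pvBfs S q c).1 ↔ z ∈ pvComp T p) ∧
      (pvBfs S q c).2.Nodup ∧ (∀ z, z ∈ (pvBfs S q c).2 ↔ z ∈ T ∧ z ∉ pvComp T p)) := by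
  fun_induction pvBfs S q c with
  | case1 S c =>
      intro h1 h2 h3 h4 _ h6 h7
      have hpc : p ∈ c := by
        rcases h7 with h | h
        · exact h
        · simp at h
      have hcl : ∀ z, pvReach T p z → z ∈ c := by
        intro z h
        induction h with
        | refl => exact hpc
        | @tail b w hb step ih =>
            by_cases hz : w ∈ c
            · exact hz
            · have hS : w ∈ S := (h3 w).mpr ⟨step.1, hz⟩
              have := h6 b ih w step.2 hS
              simp at this
      have hgc : ∀ z, z ∈ c ↔ z ∈ pvComp T p := by
        intro z
        exact ⟨h4 z, fun h => hcl z h.2⟩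
      exact ⟨h2, hgc, h1, fun z => by
        rw [h3 z]
        exact and_congr_right fun _ => not_congr (hgc z)⟩
  | case2 S c pos qs h S' nbrs ih =>
      intro h1 h2 h3 h4 h5 h6 h7
      have hposS : pos ∈ S := (PySem.Set.contains_iff S pos).mp h
      have hposC : pos ∈ pvComp T p := h5 pos (List.mem_cons_self ..)
      have hposc : pos ∉ c := ((h3 pos).mp hposS).2
      have hmemS' : ∀ z, z ∈ S' ↔ z ≠ pos ∧ z ∈ S := fun z => h1.mem_erase_iff
      have hmemN : ∀ n, n ∈ nbrs ↔ pvAdj pos n ∧ n ∈ S' := by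
        intro n
        show n ∈ List.filter _ _ ↔ _
        rw [List.mem_filter, pvDirs_map pos]
        simp only [PySem.Set.contains_iff]
        exact and_congr_left fun _ => Iff.rfl
      apply ih
      · exact h1.erase pos
      · refine List.Nodup.append h2 (List.nodup_singleton pos) ?_
        intro a ha hb
        simp only [List.mem_singleton] at hb
        subst hb; exact hposc ha
      · intro z
        rw [hmemS' z, h3 z]
        simp only [List.mem_append, List.mem_singleton]
        tauto
      · intro z hz
        rcases List.mem_append.mp hz with hz | hz
        · exact h4 z hz
        · rw [List.mem_singleton] at hz; exact hz ▸ hposC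
      · intro z hz
        rcases List.mem_append.mp hz with hz | hz
        · exact h5 z (List.mem_cons_of_mem _ hz)
        · rcases (hmemN z).mp hz with ⟨hadj, hzS'⟩
          have hzT : z ∈ T := ((h3 z).mp ((hmemS' z).mp hzS').2).1
          exact pvComp_closed hposC hzT hadj
      · intro a ha b hadj hbS'
        rcases List.mem_append.mp ha with ha | ha
        · have hbS : b ∈ S := ((hmemS' b).mp hbS').2
          have hbq := h6 a ha b hadj hbS
          rcases List.mem_cons.mp hbq with rfl | hbq
          · exact absurd rfl ((hmemS' b).mp hbS').1
          · exact List.mem_append.mpr (Or.inl hbq)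
        · rw [List.mem_singleton] at ha
          subst ha
          exact List.mem_append.mpr (Or.inr ((hmemN b).mpr ⟨hadj, hbS'⟩))
      · rcases h7 with h7 | h7
        · exact Or.inl (List.mem_append.mpr (Or.inl h7))
        · rcases List.mem_cons.mp h7 with rfl | h7
          · exact Or.inl (List.mem_append.mpr (Or.inr (List.mem_singleton.mpr rfl)))
          · exact Or.inr (List.mem_append.mpr (Or.inl h7))
  | case3 S c pos qs h ih =>
      intro h1 h2 h3 h4 h5 h6 h7
      have hposS : pos ∉ S := by
        intro hm
        exact absurd ((PySem.Set.contains_iff S pos).mpr hm) (by simpa using h)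
      apply ih h1 h2 h3 h4
      · intro z hz; exact h5 z (List.mem_cons_of_mem _ hz)
      · intro a ha b hadj hbS
        rcases List.mem_cons.mp (h6 a ha b hadj hbS) with rfl | hbq
        · exact absurd hbS hposS
        · exact hbq
      · rcases h7 with h7 | h7
        · exact Or.inl h7
        · rcases List.mem_cons.mp h7 with rfl | h7
          · have hpT : p ∈ T := (h5 p (List.mem_cons_self ..)).1
            exact Or.inl (by
              by_contra hpc
              exact hposS ((h3 p).mpr ⟨hpT, hpc⟩))
          · exact Or.inr h7

theorem pvBfs_run (S : PySem.Set (Int × Int)) (hS : S.Nodup) (p : Int × Int) (hp : p ∈ S) :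
    (pvBfs S [p] []).1.Nodup ∧
      (∀ z, z ∈ (pvBfs S [p] []).1 ↔ z ∈ pvComp {w | w ∈ S} p) ∧
      (pvBfs S [p] []).2.Nodup ∧
      (∀ z, z ∈ (pvBfs S [p] []).2 ↔ z ∈ {w | w ∈ S} ∧ z ∉ pvComp {w | w ∈ S} p) := by
  refine pvBfs_inv {w | w ∈ S} p S [p] [] hS List.nodup_nil (fun z => by simp) (by simp) ?_
    (by intro a ha; simp at ha) (Or.inr (by simp))
  intro z hz
  rw [List.mem_singleton] at hz
  subst hz
  exact pvComp_self hp

theorem pvLoop_spec :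
    ∀ (fuel : Nat) (S : PySem.Set (Int × Int)) (groups : List (List (Int × Int))),
    S.Nodup → S.length ≤ fuel →
    ((pvLoop fuel S groups).any (fun g => decide (50 < g.length)) = true ↔
      ((groups.any (fun g => decide (50 < g.length))) = true ∨ pvBig {z | z ∈ S})) := by
  intro fuel
  induction fuel with
  | zero =>
      intro S groups hS hle
      have hnil : S = [] := List.eq_nil_of_length_eq_zero (Nat.le_zero.mp hle)
      subst hnil
      constructor
      · intro h; exact Or.inl h
      · rintro (h | ⟨q, hq, -⟩)
        · exact h
        · simp at hq
  | succ fuel ih =>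
      intro S groups hS hle
      match S with
      | [] =>
          constructor
          · intro h; exact Or.inl h
          · rintro (h | ⟨q, hq, -⟩)
            · exact h
            · simp at hq
      | p :: rest =>
          obtain ⟨hg1, hg2, hs1, hs2⟩ := pvBfs_run (p :: rest) hS p (List.mem_cons_self ..)
          set r := pvBfs (p :: rest) [p] [] with hrdef
          have hrlt : r.2.length < (p :: rest).length :=
            pvBfs_snd_len_lt (p :: rest) p [] [] (List.mem_cons_self ..)
          have hrle : r.2.length ≤ fuel := by
            simp only [List.length_cons] at hrlt hle
            omega
          have hpT : p ∈ {z | z ∈ (p :: rest : List (Int × Int))} := by simp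
          have hSet : {z | z ∈ r.2} =
              {z | z ∈ (p :: rest : List (Int × Int))} \ pvComp {z | z ∈ (p :: rest : List (Int × Int))} p := by
            ext z; simpa using hs2 z
          have hlen : r.1.length = (pvComp {z | z ∈ (p :: rest : List (Int × Int))} p).ncard :=
            pvLen_eq_ncard hg1 hg2
          show ((pvLoop fuel r.2 (groups ++ [r.1])).any _ = true ↔ _)
          rw [ih r.2 (groups ++ [r.1]) hs1 hrle, hSet, List.any_append]
          rw [pvBig_split hpT]
          simp only [List.any_cons, List.any_nil, Bool.or_false, Bool.or_eq_true,
            decide_eq_true_eq, hlen]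
          tauto

theorem hsgA_iff (positions : List (Int × Int)) :
    has_suspicious_group positions = true ↔ pvBig {z | z ∈ positions} := by
  show ((pvLoop (PySem.Set.ofList positions).length (PySem.Set.ofList positions) []).map
      (fun g => decide (50 < g.length))).any id = true ↔ _
  have hset : {z | z ∈ PySem.Set.ofList positions} = {z | z ∈ positions} := by
    ext z; simp [PySem.Set.mem_ofList]
  rw [List.any_map]
  have hcomp : (id ∘ fun g : List (Int × Int) => decide (50 < g.length))
      = fun g : List (Int × Int) => decide (50 < g.length) := rfl
  rw [hcomp, pvLoop_spec _ _ [] (PySem.Set.nodup_ofList positions) le_rfl, hset]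
  simp

-- B-side: the adjacency test of the inner loop
theorem pvTouch_iff (p : Int × Int) (c : PySem.Set (Int × Int)) :
    ((pvNbrs p).any (fun n => PySem.Set.contains c n) = true) ↔ ∃ m ∈ c, pvAdj p m := by
  simp only [List.any_eq_true, PySem.Set.contains_iff, pvAdj]
  exact ⟨fun ⟨n, h1, h2⟩ => ⟨n, h2, h1⟩, fun ⟨m, h1, h2⟩ => ⟨m, h2, h1⟩⟩

-- characterization of the inner fold of pvAddPoint
theorem pvFoldMR (p : Int × Int) :
    ∀ (comps : List (PySem.Set (Int × Int))) (m : PySem.Set (Int × Int))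
      (r : List (PySem.Set (Int × Int))), m.Nodup →
    ((comps.foldl (fun mr c =>
        if (pvNbrs p).any (fun n => PySem.Set.contains c n) then (PySem.Set.union mr.1 c, mr.2)
        else (mr.1, mr.2 ++ [c])) (m, r)).1.Nodup ∧
     (∀ z, z ∈ (comps.foldl (fun mr c =>
        if (pvNbrs p).any (fun n => PySem.Set.contains c n) then (PySem.Set.union mr.1 c, mr.2)
        else (mr.1, mr.2 ++ [c])) (m, r)).1 ↔
        z ∈ m ∨ ∃ c ∈ comps, ((pvNbrs p).any (fun n => PySem.Set.contains c n) = true) ∧ z ∈ c) ∧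
     (comps.foldl (fun mr c =>
        if (pvNbrs p).any (fun n => PySem.Set.contains c n) then (PySem.Set.union mr.1 c, mr.2)
        else (mr.1, mr.2 ++ [c])) (m, r)).2
        = r ++ comps.filter (fun c => !(pvNbrs p).any (fun n => PySem.Set.contains c n))) := by
  intro comps
  induction comps with
  | nil => intro m r hm; exact ⟨hm, fun z => by simp, by simp⟩
  | cons c cs ih =>
      intro m r hm
      by_cases hc : (pvNbrs p).any (fun n => PySem.Set.contains c n) = true
      · simp only [List.foldl_cons]
        rw [if_pos hc]
        obtain ⟨n1, n2, n3⟩ := ih (PySem.Set.union m c) r (PySem.Set.nodup_union m c hm)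
        have hcond : (!(pvNbrs p).any fun n => PySem.Set.contains c n) = false := by rw [hc]; rfl
        refine ⟨n1, fun z => ?_, by
          rw [List.filter_cons, hcond]
          simpa using n3⟩
        rw [n2 z, PySem.Set.mem_union m c z]
        constructor
        · rintro ((hz | hz) | ⟨c', hc', ht, hz⟩)
          · exact Or.inl hz
          · exact Or.inr ⟨c, List.mem_cons_self .., hc, hz⟩
          · exact Or.inr ⟨c', List.mem_cons_of_mem _ hc', ht, hz⟩
        · rintro (hz | ⟨c', hc', ht, hz⟩)
          · exact Or.inl (Or.inl hz)
          · rcases List.mem_cons.mp hc' with rfl | hc'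
            · exact Or.inl (Or.inr hz)
            · exact Or.inr ⟨c', hc', ht, hz⟩
      · simp only [List.foldl_cons]
        rw [if_neg hc]
        obtain ⟨n1, n2, n3⟩ := ih m (r ++ [c]) hm
        have hcf : ((pvNbrs p).any fun n => PySem.Set.contains c n) = false := by
          revert hc; cases ((pvNbrs p).any fun n => PySem.Set.contains c n) <;> simp
        have hcond : (!(pvNbrs p).any fun n => PySem.Set.contains c n) = true := by rw [hcf]; rfl
        refine ⟨n1, fun z => ?_, by
          rw [List.filter_cons, hcond]
          simp only [if_pos]
          rw [n3]
          simp⟩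
        rw [n2 z]
        constructor
        · rintro (hz | ⟨c', hc', ht, hz⟩)
          · exact Or.inl hz
          · exact Or.inr ⟨c', List.mem_cons_of_mem _ hc', ht, hz⟩
        · rintro (hz | ⟨c', hc', ht, hz⟩)
          · exact Or.inl hz
          · rcases List.mem_cons.mp hc' with rfl | hc'
            · exact absurd ht hc
            · exact Or.inr ⟨c', hc', ht, hz⟩

-- the body of B's outer fold, named for the proofs
def pvStepB (st : List (PySem.Set (Int × Int)) × PySem.Set (Int × Int)) (p : Int × Int) :
    List (PySem.Set (Int × Int)) × PySem.Set (Int × Int) :=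
  if PySem.Set.contains st.2 p then st else (pvAddPoint st.1 p, PySem.Set.add st.2 p)

theorem has_alt_eq (positions : List (Int × Int)) :
    has_suspicious_group_alt positions =
      (positions.foldl pvStepB ([], PySem.Set.empty)).1.any (fun c => decide (50 < c.length)) := rfl

-- invariant of B's outer fold: comps is the list of connected components of seen
theorem pvFoldB_inv :
    ∀ (ps : List (Int × Int)) (comps : List (PySem.Set (Int × Int)))
      (seen : PySem.Set (Int × Int)),
    seen.Nodup →
    (∀ c ∈ comps, c ≠ [] ∧ c.Nodup) →
    (∀ z, z ∈ seen ↔ ∃ c ∈ comps, z ∈ c) →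
    (∀ c ∈ comps, ∀ x ∈ c, ∀ z, (z ∈ c ↔ z ∈ pvComp {w | w ∈ seen} x)) →
    ((ps.foldl pvStepB (comps, seen)).2.Nodup ∧
     (∀ c ∈ (ps.foldl pvStepB (comps, seen)).1, c ≠ [] ∧ c.Nodup) ∧
     (∀ z, z ∈ (ps.foldl pvStepB (comps, seen)).2 ↔
        ∃ c ∈ (ps.foldl pvStepB (comps, seen)).1, z ∈ c) ∧
     (∀ c ∈ (ps.foldl pvStepB (comps, seen)).1, ∀ x ∈ c, ∀ z,
        (z ∈ c ↔ z ∈ pvComp {w | w ∈ (ps.foldl pvStepB (comps, seen)).2} x)) ∧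
     (∀ z, z ∈ (ps.foldl pvStepB (comps, seen)).2 ↔ z ∈ seen ∨ z ∈ ps)) := by
  intro ps
  induction ps with
  | nil =>
      intro comps seen hseen hcomps hcov hprop
      exact ⟨hseen, hcomps, hcov, hprop, fun z => by simp⟩
  | cons p ps ih =>
      intro comps seen hseen hcomps hcov hprop
      simp only [List.foldl_cons]
      by_cases hp : PySem.Set.contains seen p = true
      · have hstep : pvStepB (comps, seen) p = (comps, seen) := by unfold pvStepB; rw [if_pos hp]
        rw [hstep]
        obtain ⟨a1, a2, a3, a4, a5⟩ := ih comps seen hseen hcomps hcov hprop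
        have hpS : p ∈ seen := (PySem.Set.contains_iff seen p).mp hp
        refine ⟨a1, a2, a3, a4, fun z => ?_⟩
        rw [a5 z]
        constructor
        · rintro (h | h)
          · exact Or.inl h
          · exact Or.inr (List.mem_cons_of_mem _ h)
        · rintro (h | h)
          · exact Or.inl h
          · rcases List.mem_cons.mp h with rfl | h
            · exact Or.inl hpS
            · exact Or.inr h
      · have hstep : pvStepB (comps, seen) p = (pvAddPoint comps p, PySem.Set.add seen p) := by
          unfold pvStepB; rw [if_neg hp]
        rw [hstep]
        have hpseen : p ∉ seen := fun hm => hp ((PySem.Set.contains_iff seen p).mpr hm)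
        have hpT : p ∉ {w | w ∈ seen} := hpseen
        have hT' : {w | w ∈ PySem.Set.add seen p} = insert p {w | w ∈ seen} := by
          ext z
          simp only [Set.mem_insert_iff, Set.mem_setOf_eq, PySem.Set.mem_add]
          tauto
        obtain ⟨m1, m2, m3⟩ := pvFoldMR p comps (PySem.Set.ofList [p]) []
          (PySem.Set.nodup_ofList [p])
        have hAP : pvAddPoint comps p =
            (comps.foldl (fun mr c =>
              if (pvNbrs p).any (fun n => PySem.Set.contains c n) then (PySem.Set.union mr.1 c, mr.2)
              else (mr.1, mr.2 ++ [c])) (PySem.Set.ofList [p], [])).2 ++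
            [(comps.foldl (fun mr c =>
              if (pvNbrs p).any (fun n => PySem.Set.contains c n) then (PySem.Set.union mr.1 c, mr.2)
              else (mr.1, mr.2 ++ [c])) (PySem.Set.ofList [p], [])).1] := rfl
        rw [hAP, m3]
        simp only [List.nil_append]
        set M := (comps.foldl (fun mr c =>
              if (pvNbrs p).any (fun n => PySem.Set.contains c n) then (PySem.Set.union mr.1 c, mr.2)
              else (mr.1, mr.2 ++ [c])) (PySem.Set.ofList [p], [])).1 with hMdef
        set rest := comps.filter (fun c => !(pvNbrs p).any (fun n => PySem.Set.contains c n))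
          with hRdef
        have hMm : ∀ z, z ∈ M ↔ z = p ∨ ∃ c ∈ comps,
            ((pvNbrs p).any (fun n => PySem.Set.contains c n) = true) ∧ z ∈ c := by
          intro z
          rw [m2 z]
          constructor
          · rintro (h | h)
            · exact Or.inl (by simpa [PySem.Set.mem_ofList] using h)
            · exact Or.inr h
          · rintro (rfl | h)
            · exact Or.inl (by simp [PySem.Set.mem_ofList])
            · exact Or.inr h
        have hpM : p ∈ M := (hMm p).mpr (Or.inl rfl)
        have hrest : ∀ c ∈ rest, c ∈ comps ∧
            ((pvNbrs p).any (fun n => PySem.Set.contains c n)) = false := by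
          intro c hc
          rw [hRdef, List.mem_filter] at hc
          exact ⟨hc.1, by simpa using hc.2⟩
        have hMcomp : ∀ z, z ∈ M ↔ z ∈ pvComp (insert p {w | w ∈ seen}) p := by
          intro z
          rw [hMm z, pvComp_insert_self hpT z]
          constructor
          · rintro (rfl | ⟨c, hcmem, htouch, hzc⟩)
            · exact Or.inl rfl
            · obtain ⟨mm, hmmc, hadj⟩ := (pvTouch_iff p c).mp htouch
              refine Or.inr ⟨mm, (hcov mm).mpr ⟨c, hcmem, hmmc⟩, hadj, ?_⟩
              exact (hprop c hcmem mm hmmc z).mp hzc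
          · rintro (rfl | ⟨mm, hmmT, hadj, hzc⟩)
            · exact Or.inl rfl
            · obtain ⟨c, hcmem, hmmc⟩ := (hcov mm).mp hmmT
              refine Or.inr ⟨c, hcmem, (pvTouch_iff p c).mpr ⟨mm, hmmc, hadj⟩, ?_⟩
              exact (hprop c hcmem mm hmmc z).mpr hzc
        have hrestcomp : ∀ c ∈ rest, ∀ x ∈ c, ∀ z,
            (z ∈ c ↔ z ∈ pvComp (insert p {w | w ∈ seen}) x) := by
          intro c hc x hx z
          obtain ⟨hcmem, hfalse⟩ := hrest c hc
          have hxT : x ∈ {w | w ∈ seen} := (hcov x).mpr ⟨c, hcmem, hx⟩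
          have hnc : ∀ mm ∈ pvComp {w | w ∈ seen} x, ¬ pvAdj p mm := by
            intro mm hmm hadj
            have hmmc : mm ∈ c := (hprop c hcmem x hx mm).mpr hmm
            have ht : (pvNbrs p).any (fun n => PySem.Set.contains c n) = true :=
              (pvTouch_iff p c).mpr ⟨mm, hmmc, hadj⟩
            rw [ht] at hfalse
            exact Bool.true_eq_false.mp hfalse
          rw [pvComp_insert_other hpT hxT hnc]
          exact hprop c hcmem x hx z
        have happly := ih (rest ++ [M]) (PySem.Set.add seen p)
          (PySem.Set.nodup_add seen p hseen)
          (by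
            intro c hc
            rcases List.mem_append.mp hc with hc | hc
            · exact hcomps c (hrest c hc).1
            · rw [List.mem_singleton] at hc
              subst hc
              exact ⟨fun hnil => by simp [hnil] at hpM, m1⟩)
          (by
            intro z
            rw [PySem.Set.mem_add]
            constructor
            · rintro (hz | rfl)
              · obtain ⟨c, hcmem, hzc⟩ := (hcov z).mp hz
                by_cases ht : (pvNbrs p).any (fun n => PySem.Set.contains c n) = true
                · exact ⟨M, List.mem_append.mpr (Or.inr (List.mem_singleton.mpr rfl)),
                    (hMm z).mpr (Or.inr ⟨c, hcmem, ht, hzc⟩)⟩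
                · refine ⟨c, List.mem_append.mpr (Or.inl ?_), hzc⟩
                  rw [hRdef, List.mem_filter]
                  refine ⟨hcmem, ?_⟩
                  simp only [Bool.not_eq_true] at ht
                  rw [ht]
                  rfl
              · exact ⟨M, List.mem_append.mpr (Or.inr (List.mem_singleton.mpr rfl)), hpM⟩
            · rintro ⟨c, hc, hzc⟩
              rcases List.mem_append.mp hc with hc | hc
              · exact Or.inl ((hcov z).mpr ⟨c, (hrest c hc).1, hzc⟩)
              · rw [List.mem_singleton] at hc
                subst hc
                rcases (hMm z).mp hzc with rfl | ⟨c', hc', -, hzc'⟩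
                · exact Or.inr rfl
                · exact Or.inl ((hcov z).mpr ⟨c', hc', hzc'⟩))
          (by
            intro c hc x hx z
            rcases List.mem_append.mp hc with hc | hc
            · rw [hT']
              exact hrestcomp c hc x hx z
            · rw [List.mem_singleton] at hc
              subst hc
              rw [hT']
              have hxc : x ∈ pvComp (insert p {w | w ∈ seen}) p := (hMcomp x).mp hx
              rw [hMcomp z, pvComp_eq (Set.mem_insert p _) hxc])
        obtain ⟨a1, a2, a3, a4, a5⟩ := happly
        refine ⟨a1, a2, a3, a4, fun z => ?_⟩
        rw [a5 z, PySem.Set.mem_add]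
        constructor
        · rintro ((hz | rfl) | hz)
          · exact Or.inl hz
          · exact Or.inr (List.mem_cons_self ..)
          · exact Or.inr (List.mem_cons_of_mem _ hz)
        · rintro (hz | hz)
          · exact Or.inl (Or.inl hz)
          · rcases List.mem_cons.mp hz with rfl | hz
            · exact Or.inl (Or.inr rfl)
            · exact Or.inr hz

theorem hsgB_iff (positions : List (Int × Int)) :
    has_suspicious_group_alt positions = true ↔ pvBig {z | z ∈ positions} := by
  rw [has_alt_eq]
  obtain ⟨a1, a2, a3, a4, a5⟩ := pvFoldB_inv positions [] PySem.Set.empty List.nodup_nil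
    (by intro c hc; simp at hc) (by intro z; constructor <;> rintro ⟨⟩ <;> simp_all)
    (by intro c hc; simp at hc)
  set res := positions.foldl pvStepB ([], PySem.Set.empty) with hres
  have hTset : {w | w ∈ res.2} = {z | z ∈ positions} := by
    ext z
    rw [Set.mem_setOf_eq, a5 z]
    constructor
    · rintro (hz | hz)
      · cases hz
      · exact hz
    · exact Or.inr
  rw [List.any_eq_true]
  constructor
  · rintro ⟨c, hc, hlen⟩
    rw [decide_eq_true_eq] at hlen
    obtain ⟨hne, hnd⟩ := a2 c hc
    obtain ⟨x, hx⟩ := List.exists_mem_of_ne_nil c hne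
    have hxT : x ∈ {z | z ∈ positions} := by
      rw [← hTset]
      exact (a3 x).mpr ⟨c, hc, hx⟩
    refine ⟨x, hxT, ?_⟩
    have hlc := pvLen_eq_ncard hnd (fun z => by rw [a4 c hc x hx z, hTset])
    omega
  · rintro ⟨q, hq, hlen⟩
    have hqseen : q ∈ res.2 := by
      have : q ∈ {w | w ∈ res.2} := by rw [hTset]; exact hq
      exact this
    obtain ⟨c, hc, hqc⟩ := (a3 q).mp hqseen
    have hnd := (a2 c hc).2
    have hlc := pvLen_eq_ncard hnd (fun z => by rw [a4 c hc q hqc z, hTset])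
    refine ⟨c, hc, ?_⟩
    rw [decide_eq_true_eq]
    omega

-- ===== VERDICT (by name: the statement is the Claim_ definition above) =====
theorem has_suspicious_group_spec : Claim_equal_has_suspicious_group := by
  intro positions _
  unfold Spec_has_suspicious_group
  rw [Bool.eq_iff_iff, hsgA_iff, hsgB_iff]
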